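-- pv_equiv track=rewrite | github.com/Yafouuu/Python | INIT_PROG/TP/TP2/algo2.py | algo2
-- ===== SOURCE A (Python) =====
-- def algo2(m):
--     """Permet de savoir s'il y a strictement plus de voyelles que de consonnes dans un mot ou non
--
--     Args:
--         m (str): un mot en minuscule
--
--     Returns:
--         bool: - si True alors il y a strictement plus de voyelles dans le mot
--               - si False alors il y a autant ou plus de consonnes dans le mot
--     """
--     res = 0
--     for l in m:
--         if l in 'aeiouy':
--             res += 1
--         else :
--             res -= 1
--
--     return res>0
-- ===== SOURCE B (Python) =====
-- def algo2(m):
--     # one scan per vowel (str.count), no per-character membership test or running balance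
--     vowels = sum(m.count(v) for v in 'aeiouy')
--     return 2 * vowels > len(m)
-- ===== Notes on version B (the rewrite author's own statement) =====
-- stated objective: faster
-- what changed: B replaces A's per-character +1/-1 running balance by six per-vowel str.count scans summed and the closed-form comparison 2*vowels > len(m); the C-level str.count scans remove the Python-level per-character loop and membership test.
import Mathlib
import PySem

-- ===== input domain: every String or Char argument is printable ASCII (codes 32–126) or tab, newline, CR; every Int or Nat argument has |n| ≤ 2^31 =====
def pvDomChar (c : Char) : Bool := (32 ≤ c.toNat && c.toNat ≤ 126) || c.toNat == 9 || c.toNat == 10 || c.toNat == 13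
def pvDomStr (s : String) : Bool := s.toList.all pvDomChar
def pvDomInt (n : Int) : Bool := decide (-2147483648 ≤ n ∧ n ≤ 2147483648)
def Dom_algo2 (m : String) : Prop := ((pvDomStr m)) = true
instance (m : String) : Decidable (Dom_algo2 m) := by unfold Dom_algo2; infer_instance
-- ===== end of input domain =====

-- B replaces A's per-character +1/-1 running balance by six per-vowel count scans summed and the closed-form test 2*vowels > len (alternative decomposition).

-- ===== PORT A =====
-- literal port: res starts at 0; each char adds 1 if in 'aeiouy', else subtracts 1; return res > 0
def algo2 (m : String) : Bool :=
  let res : Int := m.toList.foldl (fun res l => if l ∈ "aeiouy".toList then res + 1 else res - 1) 0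
  res > 0

-- ===== PORT B =====
-- port of Source B: vowels = sum(m.count(v) for v in 'aeiouy') — one count scan per vowel — then 2 * vowels > len(m)
def algo2_alt (m : String) : Bool :=
  let vowels : Int := ("aeiouy".toList.map (fun v => (m.toList.count v : Int))).sum
  2 * vowels > (m.toList.length : Int)

-- ===== PRECONDITION & SPEC =====
def Spec_algo2 (m : String) (out : Bool) : Prop := out = algo2_alt m
instance (m : String) (out : Bool) : Decidable (Spec_algo2 m out) := by unfold Spec_algo2; infer_instance

-- ===== CLAIM (what is proved, stated in full; the proofs are below) =====
def Claim_equal_algo2 : Prop := ∀ (m : String), Dom_algo2 m → Spec_algo2 m (algo2 m)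

-- ===== LEMMAS AND PROOFS =====

-- the summed per-vowel counts grow by 1 on a vowel cons and by 0 otherwise
theorem sumCounts_cons (x : Char) (t : List Char) :
    ("aeiouy".toList.map (fun v => ((x :: t).count v : Int))).sum
      = ("aeiouy".toList.map (fun v => (t.count v : Int))).sum
        + (if x ∈ "aeiouy".toList then 1 else 0) := by
  simp only [show "aeiouy".toList = ['a','e','i','o','u','y'] from rfl,
    List.count_cons, List.map, List.sum_cons, List.sum_nil, List.mem_cons,
    List.not_mem_nil, or_false, beq_iff_eq]
  by_cases h : x = 'a' ∨ x = 'e' ∨ x = 'i' ∨ x = 'o' ∨ x = 'u' ∨ x = 'y'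
  · rw [if_pos h]
    rcases h with h | h | h | h | h | h <;> subst h <;> simp <;> ring
  · rw [if_neg h]
    push Not at h
    obtain ⟨ha, he, hi, ho, hu, hy⟩ := h
    rw [if_neg ha, if_neg he, if_neg hi, if_neg ho, if_neg hu, if_neg hy]
    push_cast; ring

-- A's signed balance equals 2 * (summed per-vowel counts) − length
theorem algo2_balance (l : List Char) (a : Int) :
    l.foldl (fun res c => if c ∈ "aeiouy".toList then res + 1 else res - 1) a
      = a + 2 * ("aeiouy".toList.map (fun v => (l.count v : Int))).sum - (l.length : Int) := by
  induction l generalizing a with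
  | nil => simp
  | cons x t ih =>
      rw [List.foldl_cons, List.length_cons, sumCounts_cons]
      by_cases h : x ∈ "aeiouy".toList
      · rw [if_pos h, if_pos h, ih]; push_cast; ring
      · rw [if_neg h, if_neg h, ih]; push_cast; ring

-- ===== VERDICT (by name: the statement is the Claim_ definition above) =====
theorem algo2_spec : Claim_equal_algo2 := by
  intro m _
  show algo2 m = algo2_alt m
  unfold algo2 algo2_alt
  rw [algo2_balance m.toList 0]
  simp only [decide_eq_decide]
  omega
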